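-- pv_equiv track=rewrite | github.com/phawit/decode_sorrakul | phawit.py | text_key
-- ===== SOURCE A (Python) =====
-- def text_key(a):
--     x = sorted(a)
--     y = [0]*len(a)
--     for i in range(0,len(a)):
--         for j in range(0,len(a)):
--             if a[i] == x[j]:
--                y[i] = j
--
--     for j in range(1,len(y)+1):
--          s = y[-j]
--          k = 0
--          for i in range(1,len(y)+1):
--               if y[-i] == s:
--                  y[-i] = s+k
--                  k -= 1
--
--     return(y)
-- ===== SOURCE B (Python) =====
-- def text_key(a):
--     # rank of a[i] under stable sort = (# elements < a[i]) + (# equal elements before i)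
--     return [sum(1 for x in a if x < v) + sum(1 for x in a[:i] if x == v)
--             for i, v in enumerate(a)]
-- ===== Notes on version B (the rewrite author's own statement) =====
-- stated objective: simpler
-- what changed: Replaces sort + nested index-matching loops + a backwards duplicate fix-up pass by a direct counting formula: rank[i] = #(elements < a[i]) + #(equal elements before i).
import Mathlib
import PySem

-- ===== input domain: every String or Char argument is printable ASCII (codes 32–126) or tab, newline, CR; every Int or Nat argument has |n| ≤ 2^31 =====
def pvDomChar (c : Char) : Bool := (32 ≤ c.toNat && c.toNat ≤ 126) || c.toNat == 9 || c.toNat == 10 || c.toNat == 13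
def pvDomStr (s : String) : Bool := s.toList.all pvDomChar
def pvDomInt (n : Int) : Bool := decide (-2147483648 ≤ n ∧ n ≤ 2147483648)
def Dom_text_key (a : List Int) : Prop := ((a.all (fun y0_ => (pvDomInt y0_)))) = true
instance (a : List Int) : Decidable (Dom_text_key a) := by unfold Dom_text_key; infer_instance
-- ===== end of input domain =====

-- B replaces A's sort + index-matching loops + backwards fix-up pass by the direct
-- counting formula rank[i] = #(elements < a[i]) + #(equal elements before i) (simpler).

-- ===== PORT A =====
-- first nested loop of A: y[i] = j whenever a[i] == x[j] (last matching j wins);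
-- all indices are in range, so getD is exact here.
def pvPass1 (a x : List Int) : List Int :=
  (List.range a.length).foldl (fun y i =>
    (List.range a.length).foldl (fun y j =>
      if a.getD i 0 = x.getD j 0 then y.set i (j : Int) else y) y)
    (List.replicate a.length (0 : Int))

-- inner loop of A's second pass: for i in range(1, len(y)+1): if y[-i]==s: y[-i]=s+k; k-=1
-- y[-i] is y[len(y)-i], always in range since 1 ≤ i ≤ len(y).
def pvScan (s : Int) (y : List Int) : List Int :=
  ((List.range' 1 y.length).foldl (fun (st : List Int × Int) i =>
      if st.1.getD (st.1.length - i) 0 = s then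
        (st.1.set (st.1.length - i) (s + st.2), st.2 - 1)
      else st)
    (y, 0)).1

-- outer loop of A's second pass: for j in range(1, len(y)+1): s = y[-j]; …
def pvPass2 (y : List Int) : List Int :=
  (List.range' 1 y.length).foldl (fun y j => pvScan (y.getD (y.length - j) 0) y) y

def text_key (a : List Int) : List Int :=
  pvPass2 (pvPass1 a (PySem.List.sorted a (fun v => v) false))

-- ===== PORT B =====
def text_key_alt (a : List Int) : List Int :=
  (PySem.List.enumerate a).map (fun iv =>
    ((a.countP (fun u => decide (u < iv.2)) : Int)
      + ((a.take iv.1.toNat).countP (fun u => decide (u = iv.2)) : Int)))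

-- ===== PRECONDITION & SPEC =====
def Spec_text_key (a : List Int) (out : List Int) : Prop := out = text_key_alt a
instance (a : List Int) (out : List Int) : Decidable (Spec_text_key a out) := by unfold Spec_text_key; infer_instance

-- ===== CLAIM (what is proved, stated in full; the proofs are below) =====
def Claim_equal_text_key : Prop := ∀ (a : List Int), Dom_text_key a → Spec_text_key a (text_key a)

-- ===== LEMMAS AND PROOFS =====

-- counts and the stable rank
def cntLt (a : List Int) (v : Int) : Nat := a.countP (fun u => decide (u < v))
def cntEq (a : List Int) (v : Int) : Nat := a.countP (fun u => decide (u = v))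
def rk (a : List Int) (i : Nat) : Int :=
  (cntLt a (a.getD i 0) : Int) + ((a.take i).countP (fun u => decide (u = a.getD i 0)) : Int)
def mTop (a : List Int) (v : Int) : Int := (cntLt a v : Int) + (cntEq a v : Int) - 1

theorem alt_length (a : List Int) : (text_key_alt a).length = a.length := by
  simp [text_key_alt]

theorem alt_getD (a : List Int) (i : Nat) (h : i < a.length) :
    (text_key_alt a).getD i 0 = rk a i := by
  unfold text_key_alt rk cntLt
  rw [List.getD_eq_getElem]
  · rw [List.getElem_map, PySem.List.getElem_enumerate]
    simp [List.getD_eq_getElem?_getD, List.getElem?_eq_getElem h]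
  · simp [PySem.List.length_enumerate, h]

-- ---- basic rank facts ----
theorem cntEq_pos (a : List Int) (i : Nat) (h : i < a.length) : 1 ≤ cntEq a (a.getD i 0) := by
  have hm : a.getD i 0 ∈ a := by
    rw [List.getD_eq_getElem _ _ h]; exact List.getElem_mem h
  unfold cntEq
  have : 0 < a.countP (fun u => decide (u = a.getD i 0)) := by
    rw [List.countP_pos_iff]
    exact ⟨a.getD i 0, hm, by simp⟩
  omega

theorem countP_take_succ (a : List Int) (i : Nat) (h : i < a.length) (p : Int → Bool) :
    (a.take (i+1)).countP p = (a.take i).countP p + (if p (a.getD i 0) then 1 else 0) := by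
  rw [List.take_add_one, List.countP_append, List.getD_eq_getElem _ _ h]
  simp [List.getElem?_eq_getElem h, List.countP_cons]

theorem countP_take_bound (a : List Int) (i : Nat) (h : i < a.length) (p : Int → Bool)
    (hp : p (a.getD i 0)) : (a.take i).countP p + 1 ≤ a.countP p := by
  have h1 : a.countP p = (a.take (i+1)).countP p + (a.drop (i+1)).countP p := by
    rw [← List.countP_append, List.take_append_drop]
  have h2 := countP_take_succ a i h p
  rw [if_pos hp] at h2
  omega

theorem countP_take_mono (a : List Int) (p : Int → Bool) (i j : Nat) (h : i ≤ j) :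
    (a.take i).countP p ≤ (a.take j).countP p := by
  have h1 : (a.take j).take i = a.take i := by rw [List.take_take, min_eq_left h]
  have h2 := List.take_append_drop i (a.take j)
  rw [h1] at h2
  calc (a.take i).countP p ≤ (a.take i).countP p + (((a.take j).drop i).countP p) := Nat.le_add_right _ _
    _ = (a.take j).countP p := by rw [← List.countP_append, h2]

theorem countP_lt_add_eq_le (a : List Int) (v w : Int) (hvw : v < w) :
    a.countP (fun u => decide (u < v)) + a.countP (fun u => decide (u = v))
      ≤ a.countP (fun u => decide (u < w)) := by
  induction a with
  | nil => simp
  | cons h t ih =>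
      simp only [List.countP_cons]
      by_cases h2 : h = v
      · subst h2
        simp only [lt_irrefl, decide_false, Bool.false_eq_true, if_false, decide_true, if_true, hvw]
        omega
      · by_cases h1 : h < v
        · have h3 : h < w := lt_trans h1 hvw
          simp only [h1, h2, h3, decide_true, decide_false, if_true, Bool.false_eq_true, if_false]
          omega
        · by_cases h3 : h < w <;>
            simp only [h1, h2, h3, decide_true, decide_false, if_true, Bool.false_eq_true,
              if_false] <;> omega

theorem rk_bounds (a : List Int) (i : Nat) (h : i < a.length) :
    (cntLt a (a.getD i 0) : Int) ≤ rk a i ∧ rk a i ≤ mTop a (a.getD i 0) := by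
  have hb := countP_take_bound a i h (fun u => decide (u = a.getD i 0)) (by simp)
  have he := cntEq_pos a i h
  unfold rk mTop cntLt cntEq at *
  omega

theorem ranges_disjoint (a : List Int) (v w : Int) (hv : v ∈ a) (hw : w ∈ a) (hne : v ≠ w)
    (r r' : Int) (h1 : (cntLt a v : Int) ≤ r) (h2 : r ≤ mTop a v)
    (h3 : (cntLt a w : Int) ≤ r') (h4 : r' ≤ mTop a w) : r ≠ r' := by
  rcases lt_or_gt_of_ne hne with hlt | hlt
  · have := countP_lt_add_eq_le a v w hlt
    simp only [cntLt, cntEq, mTop] at *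
    omega
  · have := countP_lt_add_eq_le a w v hlt
    simp only [cntLt, cntEq, mTop] at *
    omega

theorem rk_strictMono (a : List Int) (i i' : Nat) (h : i < i') (h' : i' < a.length)
    (he : a.getD i 0 = a.getD i' 0) : rk a i < rk a i' := by
  have hi : i < a.length := lt_trans h h'
  have h1 := countP_take_succ a i hi (fun u => decide (u = a.getD i' 0))
  rw [if_pos (decide_eq_true he)] at h1
  have h2 := countP_take_mono a (fun u => decide (u = a.getD i' 0)) (i+1) i' h
  unfold rk
  rw [he]
  omega

-- ---- pass 1 ----
theorem sorted_decomp (x : List Int) (hs : x.Pairwise (· ≤ ·)) (v : Int) :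
    x = x.filter (fun u => decide (u < v)) ++ x.filter (fun u => decide (u = v))
          ++ x.filter (fun u => decide (v < u)) := by
  induction x with
  | nil => simp
  | cons h t ih =>
      rw [List.pairwise_cons] at hs
      obtain ⟨hall, hst⟩ := hs
      have iht := ih hst
      rcases lt_trichotomy h v with h1 | h1 | h1
      · have h2 : ¬ h = v := ne_of_lt h1
        have h3 : ¬ v < h := not_lt_of_gt h1
        simp only [List.filter_cons, decide_eq_true_eq, h1, h2, h3, if_true, if_false,
          decide_true, decide_false, Bool.false_eq_true]
        rw [List.cons_append]
        exact congrArg _ iht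
      · subst h1
        have e1 : t.filter (fun u => decide (u < h)) = [] := by
          rw [List.filter_eq_nil_iff]
          intro u hu
          simp only [decide_eq_true_eq, not_lt]
          exact hall u hu
        simp only [List.filter_cons, decide_eq_true_eq, lt_irrefl, if_false, if_true,
          decide_true, decide_false, Bool.false_eq_true, e1]
        rw [e1] at iht
        simp only [List.nil_append] at iht ⊢
        rw [List.cons_append]
        exact congrArg _ iht
      · have h2 : ¬ h = v := (ne_of_gt h1)
        have h3 : ¬ h < v := not_lt_of_gt h1
        have e1 : t.filter (fun u => decide (u < v)) = [] := by
          rw [List.filter_eq_nil_iff]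
          intro u hu
          simp only [decide_eq_true_eq, not_lt]
          exact le_trans (le_of_lt h1) (hall u hu)
        have e2 : t.filter (fun u => decide (u = v)) = [] := by
          rw [List.filter_eq_nil_iff]
          intro u hu
          simp only [decide_eq_true_eq]
          intro huv
          have := hall u hu
          omega
        simp only [List.filter_cons, decide_eq_true_eq, h1, h2, h3, if_true, if_false,
          decide_true, decide_false, Bool.false_eq_true, e1, e2]
        rw [e1, e2] at iht
        simpa using iht

theorem sorted_getD_char (x : List Int) (hs : x.Pairwise (· ≤ ·)) (v : Int) (j : Nat)
    (hj : j < x.length) :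
    x.getD j 0 = v ↔ (cntLt x v ≤ j ∧ j < cntLt x v + cntEq x v) := by
  have hx := sorted_decomp x hs v
  set A := x.filter (fun u => decide (u < v)) with hA
  set B := x.filter (fun u => decide (u = v)) with hB
  set C := x.filter (fun u => decide (v < u)) with hC
  have hLA : cntLt x v = A.length := by rw [cntLt, hA, List.countP_eq_length_filter]
  have hLB : cntEq x v = B.length := by rw [cntEq, hB, List.countP_eq_length_filter]
  have hlen : x.length = A.length + B.length + C.length := by
    conv_lhs => rw [hx]
    simp [List.length_append]
    omega
  rw [List.getD_eq_getElem _ _ hj, hLA, hLB]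
  have hj' : j < (A ++ B ++ C).length := by rw [← hx]; exact hj
  have hxj : x[j] = (A ++ B ++ C)[j] := List.getElem_of_eq hx hj
  by_cases hj1 : j < A.length
  · have h1 : (A ++ B ++ C)[j] = A[j] := by
      rw [List.getElem_append_left (by simp; omega)]
      exact List.getElem_append_left hj1
    have hallA : ∀ u ∈ A, u < v := by
      intro u hu
      rw [hA, List.mem_filter] at hu
      simpa using hu.2
    have hlt : A[j] < v := hallA _ (List.getElem_mem hj1)
    constructor
    · intro hv
      rw [hxj, h1] at hv
      omega
    · intro hv
      omega
  · by_cases hj2 : j < A.length + B.length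
    · have h1 : (A ++ B ++ C)[j] = B[j - A.length] := by
        rw [List.getElem_append_left (by simp; omega)]
        exact List.getElem_append_right (by omega)
      have hallB : ∀ u ∈ B, u = v := by
        intro u hu
        rw [hB, List.mem_filter] at hu
        simpa using hu.2
      have heq : B[j - A.length] = v := hallB _ (List.getElem_mem (by omega))
      constructor
      · intro _
        omega
      · intro _
        rw [hxj, h1, heq]
    · have hidx : j - (A ++ B).length < C.length := by
        simp only [List.length_append]
        omega
      have h1 : (A ++ B ++ C)[j] = C[j - (A ++ B).length]'hidx := by
        exact List.getElem_append_right (by simp; omega)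
      have hallC : ∀ u ∈ C, v < u := by
        intro u hu
        rw [hC, List.mem_filter] at hu
        simpa using hu.2
      have hgt : v < C[j - (A ++ B).length]'hidx := hallC _ (List.getElem_mem hidx)
      constructor
      · intro hv
        rw [hxj, h1] at hv
        omega
      · intro hv
        omega

theorem foldl_set_last (i : Nat) (f : Nat → Int) (P : Nat → Prop) [DecidablePred P]
    (L : List Nat) (y : List Int) :
    L.foldl (fun y j => if P j then y.set i (f j) else y) y =
      match (L.filter (fun j => decide (P j))).getLast? with
      | none => y
      | some j => y.set i (f j) := by
  induction L using List.reverseRecOn generalizing y with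
  | nil => simp
  | append_singleton L j ih =>
      rw [List.foldl_append, ih, List.filter_append]
      by_cases hP : P j
      · simp only [List.foldl_cons, List.foldl_nil, if_pos hP, List.filter_cons,
          decide_eq_true_eq, hP, if_true, List.filter_nil, decide_true]
        rw [List.getLast?_concat]
        cases hlast : (L.filter (fun j => decide (P j))).getLast? with
        | none => simp [hlast]
        | some j' => simp [hlast, List.set_set]
      · simp [hP]

theorem filter_range_window (n w e : Nat) (P : Nat → Prop) [DecidablePred P] (hwe : w + e ≤ n)
    (hP : ∀ j, j < n → (P j ↔ (w ≤ j ∧ j < w + e))) :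
    (List.range n).filter (fun j => decide (P j)) = List.range' w e := by
  have hc : ∀ j ∈ List.range n, decide (P j) = decide (w ≤ j ∧ j < w + e) := by
    intro j hj
    rw [List.mem_range] at hj
    exact decide_eq_decide.mpr (hP j hj)
  rw [List.filter_congr hc]
  have hsplit : List.range n = List.range' 0 w ++ List.range' w e ++ List.range' (w+e) (n-w-e) := by
    rw [List.range_eq_range', List.append_assoc]
    have h1 : List.range' w e ++ List.range' (w+e) (n-w-e) = List.range' w (e + (n-w-e)) := by
      have := @List.range'_append w e (n-w-e) 1
      simpa using this
    rw [h1]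
    have h2 := @List.range'_append 0 w (e + (n-w-e)) 1
    simp only [Nat.zero_add, Nat.one_mul] at h2
    rw [h2]
    congr 1
    omega
  rw [hsplit, List.filter_append, List.filter_append]
  have f1 : (List.range' 0 w).filter (fun j => decide (w ≤ j ∧ j < w + e)) = [] := by
    rw [List.filter_eq_nil_iff]
    intro j hj
    rw [List.mem_range'_1] at hj
    simp only [decide_eq_true_eq, not_and]
    omega
  have f2 : (List.range' w e).filter (fun j => decide (w ≤ j ∧ j < w + e)) = List.range' w e := by
    rw [List.filter_eq_self]
    intro j hj
    rw [List.mem_range'_1] at hj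
    simp only [decide_eq_true_eq]
    omega
  have f3 : (List.range' (w+e) (n-w-e)).filter (fun j => decide (w ≤ j ∧ j < w + e)) = [] := by
    rw [List.filter_eq_nil_iff]
    intro j hj
    rw [List.mem_range'_1] at hj
    simp only [decide_eq_true_eq, not_and]
    omega
  rw [f1, f2, f3]
  simp

theorem getLast_range' (w e : Nat) (he : 1 ≤ e) :
    (List.range' w e).getLast? = some (w + e - 1) := by
  obtain ⟨e', rfl⟩ : ∃ e', e = e' + 1 := ⟨e - 1, by omega⟩
  rw [List.range'_concat, List.getLast?_concat]
  simp

theorem cnt_window_le (x : List Int) (hs : x.Pairwise (· ≤ ·)) (v : Int) :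
    cntLt x v + cntEq x v ≤ x.length := by
  have hx := sorted_decomp x hs v
  have hl := congrArg List.length hx
  simp only [List.length_append] at hl
  rw [cntLt, cntEq, List.countP_eq_length_filter, List.countP_eq_length_filter]
  omega

theorem pass1_inner (a x : List Int) (i : Nat) (hs : x.Pairwise (· ≤ ·))
    (hlen : x.length = a.length)
    (hw : cntLt x (a.getD i 0) = cntLt a (a.getD i 0))
    (he : cntEq x (a.getD i 0) = cntEq a (a.getD i 0))
    (hi : i < a.length) (he1 : 1 ≤ cntEq a (a.getD i 0)) (y : List Int) :
    (List.range a.length).foldl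
        (fun y j => if a.getD i 0 = x.getD j 0 then y.set i (j : Int) else y) y
      = y.set i ((cntLt a (a.getD i 0) + cntEq a (a.getD i 0) - 1 : Nat) : Int) := by
  rw [foldl_set_last i (fun j => (j : Int)) (fun j => a.getD i 0 = x.getD j 0)]
  have hwin : (List.range a.length).filter (fun j => decide (a.getD i 0 = x.getD j 0))
      = List.range' (cntLt a (a.getD i 0)) (cntEq a (a.getD i 0)) := by
    apply filter_range_window
    · have := cnt_window_le x hs (a.getD i 0)
      omega
    · intro j hj
      rw [eq_comm, sorted_getD_char x hs (a.getD i 0) j (by omega), hw, he]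
  rw [hwin, getLast_range' _ _ he1]

theorem foldl_range_set (g : Nat → Int) (n : Nat) (y0 : List Int) (hy : y0.length = n)
    (t : Nat) (ht : t ≤ n) :
    ((List.range t).foldl (fun y i => y.set i (g i)) y0).length = n ∧
      (∀ q, q < n → ((List.range t).foldl (fun y i => y.set i (g i)) y0).getD q 0
        = if q < t then g q else y0.getD q 0) := by
  induction t with
  | zero => simp [hy]
  | succ t ih =>
      obtain ⟨ihl, ihv⟩ := ih (by omega)
      rw [List.range_succ, List.foldl_append, List.foldl_cons, List.foldl_nil]
      constructor
      · rw [List.length_set, ihl]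
      · intro q hq
        rw [List.getD_eq_getElem?_getD, List.getElem?_set]
        by_cases hqt : q = t
        · subst hqt
          simp only [if_pos rfl, ihl, hq, if_true]
          simp [hq]
        · simp only [if_neg (Ne.symm hqt)]
          rw [← List.getD_eq_getElem?_getD, ihv q hq]
          by_cases h1 : q < t
          · rw [if_pos h1, if_pos (by omega)]
          · rw [if_neg h1, if_neg (by omega)]

theorem pass1_char (a : List Int) :
    (pvPass1 a (PySem.List.sorted a (fun v => v) false)).length = a.length ∧
      ∀ i, i < a.length →
        (pvPass1 a (PySem.List.sorted a (fun v => v) false)).getD i 0 = mTop a (a.getD i 0) := by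
  have hperm : (PySem.List.sorted a (fun v => v) false).Perm a :=
    PySem.List.sorted_perm a (fun v => v) false
  have hs : (PySem.List.sorted a (fun v => v) false).Pairwise (· ≤ ·) := by
    have := PySem.List.sorted_pairwise a (fun v => v)
    simpa using this
  have hlen : (PySem.List.sorted a (fun v => v) false).length = a.length := hperm.length_eq
  have hstep : ∀ (y : List Int), ∀ i ∈ List.range a.length,
      (List.range a.length).foldl
        (fun y j => if a.getD i 0 = (PySem.List.sorted a (fun v => v) false).getD j 0
          then y.set i (j : Int) else y) y
      = y.set i ((cntLt a (a.getD i 0) + cntEq a (a.getD i 0) - 1 : Nat) : Int) := by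
    intro y i hi
    rw [List.mem_range] at hi
    exact pass1_inner a _ i hs hlen
      (hperm.countP_eq _) (hperm.countP_eq _) hi (cntEq_pos a i hi) y
  have hfold : pvPass1 a (PySem.List.sorted a (fun v => v) false)
      = (List.range a.length).foldl
          (fun y i => y.set i ((cntLt a (a.getD i 0) + cntEq a (a.getD i 0) - 1 : Nat) : Int))
          (List.replicate a.length (0 : Int)) := by
    unfold pvPass1
    apply List.foldl_ext
    intro y i hi
    exact hstep y i hi
  rw [hfold]
  obtain ⟨hl, hv⟩ := foldl_range_set
    (fun i => ((cntLt a (a.getD i 0) + cntEq a (a.getD i 0) - 1 : Nat) : Int))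
    a.length (List.replicate a.length (0 : Int)) (by simp) a.length (le_refl _)
  refine ⟨hl, ?_⟩
  intro i hi
  rw [hv i hi, if_pos hi]
  have he1 := cntEq_pos a i hi
  unfold mTop
  push_cast [Nat.cast_sub (by omega : 1 ≤ cntLt a (a.getD i 0) + cntEq a (a.getD i 0))]
  ring

-- ---- pass 2 ----
theorem getD_set_self (l : List Int) (i : Nat) (v : Int) (h : i < l.length) :
    (l.set i v).getD i 0 = v := by
  rw [List.getD_eq_getElem?_getD, List.getElem?_set_self (by omega)]
  rfl

theorem getD_set_ne (l : List Int) (i j : Nat) (v : Int) (h : i ≠ j) :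
    (l.set i v).getD j 0 = l.getD j 0 := by
  rw [List.getD_eq_getElem?_getD, List.getElem?_set_ne h, ← List.getD_eq_getElem?_getD]

def scanA (s : Int) (y : List Int) (t : Nat) : List Int × Int :=
  (List.range' 1 t).foldl (fun st i =>
    if st.1.getD (st.1.length - i) 0 = s then
      (st.1.set (st.1.length - i) (s + st.2), st.2 - 1)
    else st) (y, 0)

theorem scanA_succ (s : Int) (y : List Int) (t : Nat) :
    scanA s y (t+1) =
      (fun st (i : Nat) =>
        if st.1.getD (st.1.length - i) 0 = s then
          (st.1.set (st.1.length - i) (s + st.2), st.2 - 1)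
        else st) (scanA s y t) (1+t) := by
  unfold scanA
  rw [List.range'_concat, List.foldl_append, List.foldl_cons, List.foldl_nil]
  simp only [Nat.one_mul]

theorem scan_aux (s : Int) (y : List Int) (t : Nat) (ht : t ≤ y.length) :
    (scanA s y t).1.length = y.length ∧
    (scanA s y t).2 = -(((y.drop (y.length - t)).countP (fun u => decide (u = s)) : Int)) ∧
    (∀ q, q < y.length - t → (scanA s y t).1.getD q 0 = y.getD q 0) ∧
    (∀ q, y.length - t ≤ q → q < y.length → (scanA s y t).1.getD q 0 =
      if y.getD q 0 = s then s - ((y.drop (q+1)).countP (fun u => decide (u = s)) : Int)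
      else y.getD q 0) := by
  induction t with
  | zero =>
      refine ⟨rfl, ?_, fun q _ => rfl, fun q hq1 hq2 => absurd hq1 (by omega)⟩
      simp [scanA, List.drop_length]
  | succ t ih =>
      obtain ⟨ihl, ihk, ihlo, ihhi⟩ := ih (by omega)
      have htn : t < y.length := by omega
      set p := y.length - (t+1) with hp
      have hpn : p < y.length := by omega
      have hzp : (scanA s y t).1.getD p 0 = y.getD p 0 := ihlo p (by omega)
      have hdrop : y.drop p = y.getD p 0 :: y.drop (p+1) := by
        rw [List.drop_eq_getElem_cons hpn, List.getD_eq_getElem _ _ hpn]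
      have hdrop2 : p + 1 = y.length - t := by omega
      rw [scanA_succ]
      beta_reduce
      have hidx : (scanA s y t).1.length - (1+t) = p := by omega
      by_cases hcase : (scanA s y t).1.getD ((scanA s y t).1.length - (1+t)) 0 = s
      · rw [if_pos hcase]
        rw [hidx] at hcase
        have hys : y.getD p 0 = s := hzp ▸ hcase
        simp only [hidx]
        have hc2 : (y.drop p).countP (fun u => decide (u = s))
            = (y.drop (p+1)).countP (fun u => decide (u = s)) + 1 := by
          rw [hdrop, List.countP_cons, hys]
          simp
        refine ⟨by simp [List.length_set, ihl], ?_, ?_, ?_⟩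
        · show (scanA s y t).2 - 1 = _
          rw [ihk, ← hdrop2, hc2]
          push_cast
          ring
        · intro q hq
          rw [getD_set_ne _ _ _ _ (by omega)]
          exact ihlo q (by omega)
        · intro q hq1 hq2
          by_cases hqp : q = p
          · rw [hqp, getD_set_self _ _ _ (by omega), if_pos (hqp ▸ hys : y.getD p 0 = s), ihk,
              ← hdrop2]
            ring
          · rw [getD_set_ne _ _ _ _ (by omega)]
            exact ihhi q (by omega) hq2
      · rw [if_neg hcase]
        rw [hidx] at hcase
        have hys : ¬ y.getD p 0 = s := hzp ▸ hcase
        have hc2 : (y.drop p).countP (fun u => decide (u = s))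
            = (y.drop (p+1)).countP (fun u => decide (u = s)) := by
          rw [hdrop, List.countP_cons, if_neg (by simpa using hys)]
          omega
        refine ⟨ihl, ?_, ?_, ?_⟩
        · rw [ihk, ← hdrop2, hc2]
        · intro q hq
          exact ihlo q (by omega)
        · intro q hq1 hq2
          by_cases hqp : q = p
          · subst hqp
            rw [if_neg hys, hzp]
          · exact ihhi q (by omega) hq2

theorem scan_length (s : Int) (y : List Int) : (pvScan s y).length = y.length :=
  (scan_aux s y y.length (le_refl _)).1

theorem scan_getD (s : Int) (y : List Int) (q : Nat) (h : q < y.length) :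
    (pvScan s y).getD q 0 =
      if y.getD q 0 = s then s - ((y.drop (q+1)).countP (fun u => decide (u = s)) : Int)
      else y.getD q 0 := by
  have := (scan_aux s y y.length (le_refl _)).2.2.2 q (by omega) h
  exact this

def grpDone (a : List Int) (t : Nat) (i : Nat) : Prop :=
  ∃ q, q < a.length ∧ a.length - t ≤ q ∧ a.getD q 0 = a.getD i 0

def pvInv (a : List Int) (t : Nat) (y : List Int) : Prop :=
  y.length = a.length ∧ ∀ i, i < a.length →
    (grpDone a t i → y.getD i 0 = rk a i) ∧
    (¬ grpDone a t i → y.getD i 0 = mTop a (a.getD i 0))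

theorem countP_drop_congr_aux (y a : List Int) (s v : Int) (hlen : y.length = a.length) :
    ∀ d m, a.length ≤ m + d →
      (∀ r, m ≤ r → r < a.length → (y.getD r 0 = s ↔ a.getD r 0 = v)) →
      (y.drop m).countP (fun u => decide (u = s)) = (a.drop m).countP (fun u => decide (u = v)) := by
  intro d
  induction d with
  | zero =>
      intro m hm _
      rw [List.drop_eq_nil_of_le (by omega), List.drop_eq_nil_of_le (by omega)]
      simp
  | succ d ih =>
      intro m hm h
      by_cases hlt : m < a.length
      · have hy1 : y.drop m = y.getD m 0 :: y.drop (m+1) := by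
          rw [List.drop_eq_getElem_cons (by omega), List.getD_eq_getElem _ _ (by omega)]
        have ha1 : a.drop m = a.getD m 0 :: a.drop (m+1) := by
          rw [List.drop_eq_getElem_cons hlt, List.getD_eq_getElem _ _ hlt]
        rw [hy1, ha1, List.countP_cons, List.countP_cons,
          ih (m+1) (by omega) (fun r hr1 hr2 => h r (by omega) hr2)]
        have hh := h m (le_refl m) hlt
        by_cases hv : a.getD m 0 = v
        · rw [if_pos (decide_eq_true (hh.mpr hv)), if_pos (decide_eq_true hv)]
        · rw [if_neg (by simpa using fun hc => hv (hh.mp hc)), if_neg (by simpa using hv)]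
      · rw [List.drop_eq_nil_of_le (by omega), List.drop_eq_nil_of_le (by omega)]
        simp

theorem countP_drop_congr (y a : List Int) (s v : Int) (m : Nat) (hlen : y.length = a.length)
    (h : ∀ r, m ≤ r → r < a.length → (y.getD r 0 = s ↔ a.getD r 0 = v)) :
    (y.drop m).countP (fun u => decide (u = s)) = (a.drop m).countP (fun u => decide (u = v)) :=
  countP_drop_congr_aux y a s v hlen a.length m (by omega) h

theorem countP_drop_zero (y : List Int) (s : Int) (m : Nat)
    (h : ∀ r, m ≤ r → r < y.length → ¬ y.getD r 0 = s) :
    (y.drop m).countP (fun u => decide (u = s)) = 0 := by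
  rw [List.countP_eq_zero]
  intro u hu
  rw [List.mem_iff_getElem] at hu
  obtain ⟨k, hk, hku⟩ := hu
  rw [List.getElem_drop] at hku
  have hlen : m + k < y.length := by
    rw [List.length_drop] at hk
    omega
  have := h (m+k) (by omega) hlen
  rw [List.getD_eq_getElem _ _ hlen] at this
  simp only [decide_eq_true_eq]
  exact hku ▸ this

theorem getD_mem (a : List Int) (i : Nat) (h : i < a.length) : a.getD i 0 ∈ a := by
  rw [List.getD_eq_getElem _ _ h]
  exact List.getElem_mem h

theorem pass2_step (a : List Int) (t : Nat) (y : List Int) (ht : t < a.length)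
    (hI : pvInv a t y) :
    pvInv a (t+1) (pvScan (y.getD (y.length - (t+1)) 0) y) := by
  obtain ⟨hy, hval⟩ := hI
  have hpn : a.length - (t+1) < a.length := by omega
  set p := a.length - (t+1) with hpdef
  have hyp : y.length - (t+1) = p := by omega
  rw [hyp]
  set s := y.getD p 0 with hsdef
  set z := pvScan s y with hzdef
  have hzlen : z.length = a.length := by rw [hzdef, scan_length, hy]
  have hzget : ∀ q, q < a.length → z.getD q 0 =
      if y.getD q 0 = s then s - ((y.drop (q+1)).countP (fun u => decide (u = s)) : Int)
      else y.getD q 0 := by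
    intro q hq
    rw [hzdef]
    exact scan_getD s y q (by omega)
  have hvp : a.getD p 0 ∈ a := getD_mem a p hpn
  have hgrp_val : ∀ i q : Nat, a.getD i 0 = a.getD q 0 → grpDone a t i → grpDone a t q := by
    intro i q hiq ⟨r, hr1, hr2, hr3⟩
    exact ⟨r, hr1, hr2, hr3.trans hiq⟩
  by_cases hdone : grpDone a t p
  · -- the group of p is already fixed; the scan matches only p itself and rewrites s+0=s
    have hsp : y.getD p 0 = rk a p := (hval p hpn).1 hdone
    have hmatch : ∀ q, q < a.length → (y.getD q 0 = s ↔ q = p) := by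
      intro q hq
      constructor
      · intro hqs
        by_cases hqv : a.getD q 0 = a.getD p 0
        · have hdq : grpDone a t q := hgrp_val p q hqv.symm hdone
          have hyq : y.getD q 0 = rk a q := (hval q hq).1 hdq
          by_contra hne
          rcases Nat.lt_or_ge q p with hlt | hge
          · have := rk_strictMono a q p hlt hpn hqv
            rw [← hyq, ← hsp, hqs] at this
            exact absurd this (lt_irrefl _)
          · have hlt : p < q := by omega
            have := rk_strictMono a p q hlt hq hqv.symm
            rw [← hyq, ← hsp, hqs] at this
            exact absurd this (lt_irrefl _)
        · exfalso
          have hvq : a.getD q 0 ∈ a := getD_mem a q hq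
          have hb2 := rk_bounds a p hpn
          have hd := ranges_disjoint a (a.getD q 0) (a.getD p 0) hvq hvp hqv
          by_cases hdq : grpDone a t q
          · have hyq : y.getD q 0 = rk a q := (hval q hq).1 hdq
            have hb1 := rk_bounds a q hq
            exact hd _ _ hb1.1 hb1.2 hb2.1 hb2.2 (by rw [← hyq, ← hsp]; exact hqs)
          · have hyq : y.getD q 0 = mTop a (a.getD q 0) := (hval q hq).2 hdq
            have he1 := cntEq_pos a q hq
            have hb1 : (cntLt a (a.getD q 0) : Int) ≤ mTop a (a.getD q 0) := by
              unfold mTop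
              omega
            exact hd _ _ hb1 (le_refl _) hb2.1 hb2.2 (by rw [← hyq, ← hsp]; exact hqs)
      · intro hqp
        rw [hqp]
    constructor
    · exact hzlen
    · intro i hi
      have hgd : grpDone a (t+1) i ↔ grpDone a t i := by
        constructor
        · rintro ⟨q, hq1, hq2, hq3⟩
          by_cases hq4 : a.length - t ≤ q
          · exact ⟨q, hq1, hq4, hq3⟩
          · have : q = p := by omega
            subst this
            exact hgrp_val p i hq3 hdone
        · rintro ⟨q, hq1, hq2, hq3⟩
          exact ⟨q, hq1, by omega, hq3⟩
      have hzi : z.getD i 0 = y.getD i 0 := by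
        rw [hzget i hi]
        by_cases his : y.getD i 0 = s
        · have hip : i = p := (hmatch i hi).mp his
          rw [if_pos his, countP_drop_zero y s (i+1) (by
            intro r hr1 hr2 hrs
            have h1 := (hmatch r (by omega)).mp hrs
            omega), his]
          simp
        · rw [if_neg his]
      rw [hzi, hgd]
      exact hval i hi
  · -- p is the last occurrence of a fresh group: the scan fixes the whole group
    have hsp : y.getD p 0 = mTop a (a.getD p 0) := (hval p hpn).2 hdone
    have hmatch : ∀ q, q < a.length → (y.getD q 0 = s ↔ a.getD q 0 = a.getD p 0) := by
      intro q hq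
      constructor
      · intro hqs
        by_contra hqv
        have hvq : a.getD q 0 ∈ a := getD_mem a q hq
        have he1p := cntEq_pos a p hpn
        have hb2 : (cntLt a (a.getD p 0) : Int) ≤ mTop a (a.getD p 0) := by
          unfold mTop
          omega
        have hd := ranges_disjoint a (a.getD q 0) (a.getD p 0) hvq hvp hqv
        by_cases hdq : grpDone a t q
        · have hyq : y.getD q 0 = rk a q := (hval q hq).1 hdq
          have hb1 := rk_bounds a q hq
          exact hd _ _ hb1.1 hb1.2 hb2 (le_refl _) (by rw [← hyq, ← hsp]; exact hqs)
        · have hyq : y.getD q 0 = mTop a (a.getD q 0) := (hval q hq).2 hdq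
          have he1 := cntEq_pos a q hq
          have hb1 : (cntLt a (a.getD q 0) : Int) ≤ mTop a (a.getD q 0) := by
            unfold mTop
            omega
          exact hd _ _ hb1 (le_refl _) hb2 (le_refl _) (by rw [← hyq, ← hsp]; exact hqs)
      · intro hqv
        have hnq : ¬ grpDone a t q := fun hdq => hdone (hgrp_val q p hqv hdq)
        have hyq : y.getD q 0 = mTop a (a.getD q 0) := (hval q hq).2 hnq
        rw [hyq, hqv, ← hsp]
    constructor
    · exact hzlen
    · intro i hi
      by_cases hiv : a.getD i 0 = a.getD p 0
      · -- i belongs to p's group: it is now done and gets its stable rank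
        have hgd : grpDone a (t+1) i := ⟨p, hpn, by omega, hiv.symm⟩
        have hyis : y.getD i 0 = s := (hmatch i hi).mpr hiv
        have hcnt : (y.drop (i+1)).countP (fun u => decide (u = s))
            = (a.drop (i+1)).countP (fun u => decide (u = a.getD p 0)) :=
          countP_drop_congr y a s (a.getD p 0) (i+1) (by omega)
            (fun r hr1 hr2 => hmatch r hr2)
        have hzi : z.getD i 0 = rk a i := by
          rw [hzget i hi, if_pos hyis, hcnt, hsdef, hsp]
          have hsplit : cntEq a (a.getD p 0)
              = (a.take (i+1)).countP (fun u => decide (u = a.getD p 0))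
                + (a.drop (i+1)).countP (fun u => decide (u = a.getD p 0)) := by
            rw [cntEq, ← List.countP_append, List.take_append_drop]
          have hstep := countP_take_succ a i hi (fun u => decide (u = a.getD p 0))
          rw [if_pos (decide_eq_true hiv)] at hstep
          rw [rk, hiv]
          unfold mTop
          omega
        refine ⟨fun _ => hzi, fun hnd => absurd hgd hnd⟩
      · -- other groups are untouched by the scan
        have hgd : grpDone a (t+1) i ↔ grpDone a t i := by
          constructor
          · rintro ⟨q, hq1, hq2, hq3⟩
            by_cases hq4 : a.length - t ≤ q
            · exact ⟨q, hq1, hq4, hq3⟩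
            · have : q = p := by omega
              subst this
              exact absurd hq3.symm hiv
          · rintro ⟨q, hq1, hq2, hq3⟩
            exact ⟨q, hq1, by omega, hq3⟩
        have hzi : z.getD i 0 = y.getD i 0 := by
          rw [hzget i hi, if_neg (fun hc => hiv ((hmatch i hi).mp hc))]
        rw [hzi, hgd]
        exact hval i hi

def pass2A (y0 : List Int) (t : Nat) : List Int :=
  (List.range' 1 t).foldl (fun y j => pvScan (y.getD (y.length - j) 0) y) y0

theorem pass2A_succ (y0 : List Int) (t : Nat) :
    pass2A y0 (t+1)
      = pvScan ((pass2A y0 t).getD ((pass2A y0 t).length - (t+1)) 0) (pass2A y0 t) := by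
  unfold pass2A
  rw [List.range'_concat, List.foldl_append, List.foldl_cons, List.foldl_nil]
  simp only [Nat.one_mul]
  rw [Nat.add_comm 1 t]

theorem pass2A_inv (a y0 : List Int) (h0 : pvInv a 0 y0) :
    ∀ t, t ≤ a.length → pvInv a t (pass2A y0 t) := by
  intro t
  induction t with
  | zero => intro _; exact h0
  | succ t ih =>
      intro ht
      rw [pass2A_succ]
      exact pass2_step a t (pass2A y0 t) (by omega) (ih (by omega))

theorem pass2_inv (a y0 : List Int) (h0 : pvInv a 0 y0) (hn : y0.length = a.length) :
    pvInv a a.length (pvPass2 y0) := by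
  have : pvPass2 y0 = pass2A y0 a.length := by
    unfold pvPass2 pass2A
    rw [hn]
  rw [this]
  exact pass2A_inv a y0 h0 a.length (le_refl _)

theorem main_eq (a : List Int) : text_key a = text_key_alt a := by
  obtain ⟨h1l, h1v⟩ := pass1_char a
  have h0 : pvInv a 0 (pvPass1 a (PySem.List.sorted a (fun v => v) false)) := by
    refine ⟨h1l, fun i hi => ⟨?_, fun _ => h1v i hi⟩⟩
    rintro ⟨q, hq1, hq2, _⟩
    omega
  have hfin := pass2_inv a _ h0 h1l
  obtain ⟨hfl, hfv⟩ := hfin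
  have htk : text_key a = pvPass2 (pvPass1 a (PySem.List.sorted a (fun v => v) false)) := rfl
  apply List.ext_getElem
  · rw [htk, hfl, alt_length]
  · intro i hi1 hi2
    have hia : i < a.length := by rw [htk, hfl] at hi1; exact hi1
    have hd1 : (text_key a)[i] = (text_key a).getD i 0 := (List.getD_eq_getElem _ _ hi1).symm
    have hd2 : (text_key_alt a)[i] = (text_key_alt a).getD i 0 :=
      (List.getD_eq_getElem _ _ hi2).symm
    rw [hd1, hd2, alt_getD a i hia, htk]
    exact (hfv i hia).1 ⟨i, hia, by omega, rfl⟩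

-- ===== VERDICT (by name: the statement is the Claim_ definition above) =====
theorem text_key_spec : Claim_equal_text_key := by
  intro a _
  unfold Spec_text_key
  exact main_eq a
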